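-- pv_equiv track=rewrite | github.com/ZzZDdD11/MaM-RAG | tools/evaluate_lenient.py | score_options
-- ===== SOURCE A (Python) =====
-- from typing import List, Optional, Set, Tuple
--
-- def normalize_token(tok: str, a2s: dict):
--     tok = tok.strip()
--     if not tok: return ""
--     if tok in a2s: return a2s[tok]
--     return tok
--
-- def evidence_tokens(
--     evidences: List[str],
--     a2s: dict,
--     allow: Optional[Set[str]] = None,
--     relation_keywords: Optional[List[str]] = None,
--     window: int = 32,
-- ):
--     """Extract normalized entity tokens from evidence text.
--     Simple approach: find all entities from a2s in the text, normalize them, and return.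
--     """
--     text = "\n".join(evidences)[:8000]
--     cands = set()
--     for a in a2s.keys():
--         if not a or len(a) < 2:
--             continue
--         if a in text:
--             norm = normalize_token(a, a2s)
--             if norm:
--                 cands.add(norm)
--     return cands
--
-- def score_options(
--     evidence_text: str,
--     opt_sets: List[Set[str]],
--     a2s: dict,
--     allow: Set[str],
--     relation_keywords: Optional[List[str]] = None,
--     window: int = 32,
-- ) -> Tuple[List[Tuple[int, int]], Set[str]]:
--     # If evidence is just a short "disabled" message, return zero scores to avoid spurious hits.
--     if ("Vector Disabled" in evidence_text or "Graph Disabled" in evidence_text) and len(evidence_text) < 100: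
--         ev_set = set()
--         scores = [(i, 0) for i in range(len(opt_sets))]
--         return sorted(scores, key=lambda x: x[0]), ev_set
--
--     # Extract all entities from evidence
--     ev_set = evidence_tokens([evidence_text], a2s)
--     # Filter to only entities that appear in options (allow set)
--     ev_set_filtered = ev_set & allow
--
--     # Score each option by the count of matching entities
--     scores = [(i, len(ev_set_filtered & opt_sets[i])) for i in range(len(opt_sets))]
--     scores_sorted = sorted(scores, key=lambda x: x[1], reverse=True)
--     return scores_sorted, ev_set_filtered
-- ===== SOURCE B (Python) =====
-- from typing import List, Optional, Set, Tuple
--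
-- def score_options(
--     evidence_text: str,
--     opt_sets: List[Set[str]],
--     a2s: dict,
--     allow: Set[str],
--     relation_keywords: Optional[List[str]] = None,
--     window: int = 32,
-- ) -> Tuple[List[Tuple[int, int]], Set[str]]:
--     if ("Vector Disabled" in evidence_text or "Graph Disabled" in evidence_text) and len(evidence_text) < 100:
--         return [(i, 0) for i in range(len(opt_sets))], set()
--
--     text = evidence_text[:8000]
--     # Substring index: the set of all substrings of `text` whose length is some
--     # key length; then each key is matched with a single O(1) set lookup instead
--     # of a substring scan per key.
--     lengths = {len(a) for a in a2s if len(a) >= 2}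
--     subs = set()
--     for L in lengths:
--         subs.update(text[i:i + L] for i in range(len(text) - L + 1))
--
--     # Collect the matched, normalized, allowed entities, deduplicated in
--     # first-seen order via an auxiliary `seen` set.
--     evf: List[str] = []
--     seen = set()
--     for a in a2s:
--         if len(a) >= 2 and a in subs:
--             tok = a.strip()
--             norm = a2s.get(tok, tok) if tok else ""
--             if norm and norm in allow and norm not in seen:
--                 seen.add(norm)
--                 evf.append(norm)
--
--     # Inverted index entity -> set of option indices; scoring then walks the
--     # matched entities once and bumps only the options that contain them.
--     idx = {}
--     for i, opt in enumerate(opt_sets):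
--         for e in opt:
--             idx.setdefault(e, set()).add(i)
--     counts = [0] * len(opt_sets)
--     for e in evf:
--         for i in idx.get(e, ()):
--             counts[i] += 1
--
--     pairs = sorted(enumerate(counts), key=lambda x: x[1], reverse=True)
--     return pairs, set(evf)
-- ===== Notes on version B (the rewrite author's own statement) =====
-- stated objective: alternative
-- what changed: B replaces A's per-key substring scan ('a in text' for every a2s key) by a substring index — the set of all substrings of the evidence whose length is a key length, so each key is matched by one set lookup — and replaces A's per-option set intersections by an inverted index from entity to option indices with a single count array bumped while walking the matched entities once; the pointless sort in the short-circuit branch is dropped.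
import Mathlib
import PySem

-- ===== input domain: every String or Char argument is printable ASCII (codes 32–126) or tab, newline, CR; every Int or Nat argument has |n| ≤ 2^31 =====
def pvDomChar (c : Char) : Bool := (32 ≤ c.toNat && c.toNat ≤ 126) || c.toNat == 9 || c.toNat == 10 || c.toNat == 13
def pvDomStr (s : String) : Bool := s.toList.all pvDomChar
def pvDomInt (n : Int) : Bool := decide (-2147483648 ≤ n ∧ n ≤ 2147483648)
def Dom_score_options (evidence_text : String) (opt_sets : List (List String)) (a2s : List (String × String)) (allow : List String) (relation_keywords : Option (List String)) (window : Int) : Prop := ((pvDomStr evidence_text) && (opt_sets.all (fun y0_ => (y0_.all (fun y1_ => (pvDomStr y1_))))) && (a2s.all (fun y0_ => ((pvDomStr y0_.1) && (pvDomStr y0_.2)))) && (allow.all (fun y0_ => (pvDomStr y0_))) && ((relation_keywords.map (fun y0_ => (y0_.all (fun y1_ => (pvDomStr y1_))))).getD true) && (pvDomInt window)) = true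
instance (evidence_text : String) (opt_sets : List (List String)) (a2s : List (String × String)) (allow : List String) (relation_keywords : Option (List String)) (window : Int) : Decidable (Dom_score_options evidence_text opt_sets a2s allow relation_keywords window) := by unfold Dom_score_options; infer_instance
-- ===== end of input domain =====

-- B replaces A's per-key substring scan by a substring index (set of all text substrings of
-- the key lengths, one O(1) lookup per key) and A's per-option set intersections by an
-- inverted index entity → option indices with one count array; objective: alternative.

-- ===== PORT A =====
def pvNormalizeToken (tok : String) (a2s : PySem.Dict String String) : String :=
  let tok := PySem.Str.strip tok
  if tok = "" then ""
  else
    match PySem.Dict.get? a2s tok with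
    | some v => v
    | none => tok

-- the body of A's `for a in a2s.keys()` loop, named for the proofs
def pvStepA (text : String) (a2s : PySem.Dict String String) (cands : PySem.Set String) (a : String) : PySem.Set String :=
  if a = "" ∨ PySem.Str.len a < 2 then cands
  else if PySem.Str.isIn a text then
    let norm := pvNormalizeToken a a2s
    if norm ≠ "" then PySem.Set.add cands norm else cands
  else cands

def pvEvidenceTokens (evidences : List String) (a2s : PySem.Dict String String) : PySem.Set String :=
  let text := PySem.Str.slice (PySem.Str.join "\n" evidences) none (some 8000)
  (PySem.Dict.keys a2s).foldl (pvStepA text a2s) PySem.Set.empty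

def score_options (evidence_text : String) (opt_sets : List (List String)) (a2s : List (String × String)) (allow : List String) (relation_keywords : Option (List String)) (window : Int) : (List (Int × Int)) × List String :=
  if (PySem.Str.isIn "Vector Disabled" evidence_text || PySem.Str.isIn "Graph Disabled" evidence_text) ∧ PySem.Str.len evidence_text < 100 then
    let ev_set : PySem.Set String := PySem.Set.empty
    let scores := (PySem.List.pyRange 0 opt_sets.length 1).map (fun i => (i, (0 : Int)))
    (PySem.List.sorted scores (fun x => x.1) false, ev_set)
  else
    let ev_set := pvEvidenceTokens [evidence_text] ⟨a2s⟩
    let ev_set_filtered := PySem.Set.inter ev_set allow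
    let scores := (PySem.List.pyRange 0 opt_sets.length 1).map (fun i =>
      (i, PySem.Set.len (PySem.Set.inter ev_set_filtered (PySem.List.pyGetD opt_sets i []))))
    (PySem.List.sorted scores (fun x => x.2) true, ev_set_filtered)

-- ===== PORT B =====
-- `lengths = {len(a) for a in a2s if len(a) >= 2}`
def pvLengths (a2s : List (String × String)) : PySem.Set Int :=
  PySem.Set.ofList ((a2s.filter (fun p => 2 ≤ PySem.Str.len p.1)).map (fun p => PySem.Str.len p.1))

-- the generator `text[i:i+L] for i in range(len(text) - L + 1)`
def pvSlices (text : String) (L : Int) : List String :=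
  (PySem.List.pyRange 0 (PySem.Str.len text - L + 1) 1).map
    (fun i => PySem.Str.slice text (some i) (some (i + L)))

-- `subs = set(); for L in lengths: subs.update(...)`
def pvSubs (text : String) (lengths : PySem.Set Int) : PySem.Set String :=
  lengths.foldl (fun s L => PySem.Set.update s (pvSlices text L)) PySem.Set.empty

-- the body of B's collection loop `for a in a2s: …`; state = (evf, seen)
def pvStepB (subs : PySem.Set String) (d : PySem.Dict String String) (allow : List String)
    (st : List String × PySem.Set String) (p : String × String) : List String × PySem.Set String :=
  if 2 ≤ PySem.Str.len p.1 ∧ PySem.Set.contains subs p.1 then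
    let tok := PySem.Str.strip p.1
    let norm := if tok = "" then "" else PySem.Dict.getD d tok tok
    if norm ≠ "" ∧ PySem.Set.contains allow norm ∧ ¬ PySem.Set.contains st.2 norm then
      (st.1 ++ [norm], PySem.Set.add st.2 norm)
    else st
  else st

-- `idx.setdefault(e, set()).add(i)` (indices are list positions from enumerate, hence Nat here)
def pvAddIdx (i : Nat) (d : PySem.Dict String (PySem.Set Nat)) (e : String) : PySem.Dict String (PySem.Set Nat) :=
  d.insert e (PySem.Set.add (d.getD e []) i)

-- `idx = {}; for i, opt in enumerate(opt_sets): for e in opt: …`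
def pvBuildIdx (opt_sets : List (List String)) : PySem.Dict String (PySem.Set Nat) :=
  (opt_sets.zipIdx).foldl (fun d q => q.1.foldl (pvAddIdx q.2) d) PySem.Dict.empty

-- `for i in idx.get(e, ()): counts[i] += 1` (counts[i] += 1 is List.modify, exact: i is in range)
def pvBump (idx : PySem.Dict String (PySem.Set Nat)) (counts : List Int) (e : String) : List Int :=
  (idx.getD e []).foldl (fun cs i => cs.modify i (· + 1)) counts

def score_options_alt (evidence_text : String) (opt_sets : List (List String)) (a2s : List (String × String)) (allow : List String) (relation_keywords : Option (List String)) (window : Int) : (List (Int × Int)) × List String :=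
  if (PySem.Str.isIn "Vector Disabled" evidence_text || PySem.Str.isIn "Graph Disabled" evidence_text) ∧ PySem.Str.len evidence_text < 100 then
    ((PySem.List.pyRange 0 opt_sets.length 1).map (fun i => (i, (0 : Int))), [])
  else
    let text := PySem.Str.slice evidence_text none (some 8000)
    let subs := pvSubs text (pvLengths a2s)
    let evf := (a2s.foldl (pvStepB subs ⟨a2s⟩ allow) ([], PySem.Set.empty)).1
    let counts := evf.foldl (pvBump (pvBuildIdx opt_sets)) (List.replicate opt_sets.length (0 : Int))
    (PySem.List.sorted (PySem.List.enumerate counts) (fun x => x.2) true, evf)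

-- ===== PRECONDITION & SPEC =====
def Spec_score_options (evidence_text : String) (opt_sets : List (List String)) (a2s : List (String × String)) (allow : List String) (relation_keywords : Option (List String)) (window : Int) (out : (List (Int × Int)) × List String) : Prop := out = score_options_alt evidence_text opt_sets a2s allow relation_keywords window
instance (evidence_text : String) (opt_sets : List (List String)) (a2s : List (String × String)) (allow : List String) (relation_keywords : Option (List String)) (window : Int) (out : (List (Int × Int)) × List String) : Decidable (Spec_score_options evidence_text opt_sets a2s allow relation_keywords window out) := by unfold Spec_score_options; infer_instance

-- ===== CLAIM (what is proved, stated in full; the proofs are below) =====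
def Claim_equal_score_options : Prop := ∀ (evidence_text : String) (opt_sets : List (List String)) (a2s : List (String × String)) (allow : List String) (relation_keywords : Option (List String)) (window : Int), Dom_score_options evidence_text opt_sets a2s allow relation_keywords window → Spec_score_options evidence_text opt_sets a2s allow relation_keywords window (score_options evidence_text opt_sets a2s allow relation_keywords window)

-- ===== LEMMAS AND PROOFS =====

-- proof-side reference step: B's collection loop with A's `a in text` test and list-membership dedup
def pvStepT (text : String) (d : PySem.Dict String String) (allow : List String)
    (evf : List String) (p : String × String) : List String :=
  if 2 ≤ PySem.Str.len p.1 ∧ PySem.Str.isIn p.1 text then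
    let tok := PySem.Str.strip p.1
    let norm := if tok = "" then "" else PySem.Dict.getD d tok tok
    if norm ≠ "" ∧ PySem.Set.contains allow norm ∧ ¬ evf.contains norm then evf ++ [norm]
    else evf
  else evf

-- proof-side reference step: B's collection loop with the subs test and list-membership dedup
def pvStepS (subs : PySem.Set String) (d : PySem.Dict String String) (allow : List String)
    (evf : List String) (p : String × String) : List String :=
  if 2 ≤ PySem.Str.len p.1 ∧ PySem.Set.contains subs p.1 then
    let tok := PySem.Str.strip p.1
    let norm := if tok = "" then "" else PySem.Dict.getD d tok tok
    if norm ≠ "" ∧ PySem.Set.contains allow norm ∧ ¬ PySem.Set.contains evf norm then evf ++ [norm]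
    else evf
  else evf

-- normalize_token = "strip, then a2s.get(tok, tok) unless empty"
theorem pv_norm_eq (a : String) (d : PySem.Dict String String) :
    pvNormalizeToken a d =
      (if PySem.Str.strip a = "" then ""
       else PySem.Dict.getD d (PySem.Str.strip a) (PySem.Str.strip a)) := by
  simp only [pvNormalizeToken, PySem.Dict.getD]
  split
  · rfl
  · cases h : PySem.Dict.get? d (PySem.Str.strip a) <;> simp

-- filtering by `allow` commutes with Set.add
theorem pv_inter_add (allow cands : List String) (n : String) :
    PySem.Set.inter (PySem.Set.add cands n) allow =
      (if PySem.Set.contains allow n ∧ ¬ List.contains (PySem.Set.inter cands allow) n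
       then PySem.Set.inter cands allow ++ [n] else PySem.Set.inter cands allow) := by
  simp only [PySem.Set.inter, PySem.Set.add, PySem.Set.contains]
  by_cases hc : n ∈ cands <;> by_cases ha : n ∈ allow <;>
    simp [List.filter_append, hc, ha, List.mem_filter]

-- the fused pass computes exactly (candidates from A's pass) ∩ allow
theorem pv_fuse (text : String) (d : PySem.Dict String String) (allow : List String) :
    ∀ (l : List (String × String)) (cands : List String),
      PySem.Set.inter (l.foldl (fun c p => pvStepA text d c p.1) cands) allow
        = l.foldl (pvStepT text d allow) (PySem.Set.inter cands allow) := by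
  intro l
  induction l with
  | nil => intro cands; rfl
  | cons p l ih =>
    intro cands
    simp only [List.foldl_cons]
    by_cases h2 : 2 ≤ PySem.Str.len p.1
    · have hne : ¬ (p.1 = "" ∨ PySem.Str.len p.1 < 2) := by
        rintro (h | h)
        · rw [h] at h2; exact absurd h2 (by decide)
        · omega
      by_cases hin : PySem.Str.isIn p.1 text
      · by_cases hn : pvNormalizeToken p.1 d = ""
        · have hA : pvStepA text d cands p.1 = cands := by
            simp only [pvStepA]
            rw [if_neg hne, if_pos hin, if_neg (show ¬ (pvNormalizeToken p.1 d ≠ "") from by simpa using hn)]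
          have hB : pvStepT text d allow (PySem.Set.inter cands allow) p = PySem.Set.inter cands allow := by
            simp only [pvStepT, ← pv_norm_eq p.1 d]
            rw [if_pos (show (2 ≤ PySem.Str.len p.1 ∧ PySem.Str.isIn p.1 text = true) from ⟨h2, hin⟩),
                if_neg (show ¬ (pvNormalizeToken p.1 d ≠ "" ∧ _) from fun hcon => hcon.1 hn)]
          rw [hA, hB]
          exact ih cands
        · have hA : pvStepA text d cands p.1 = PySem.Set.add cands (pvNormalizeToken p.1 d) := by
            simp only [pvStepA]
            rw [if_neg hne, if_pos hin, if_pos (show pvNormalizeToken p.1 d ≠ "" from hn)]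
          have hB : pvStepT text d allow (PySem.Set.inter cands allow) p =
              (if PySem.Set.contains allow (pvNormalizeToken p.1 d) ∧
                   ¬ List.contains (PySem.Set.inter cands allow) (pvNormalizeToken p.1 d)
               then PySem.Set.inter cands allow ++ [pvNormalizeToken p.1 d]
               else PySem.Set.inter cands allow) := by
            simp only [pvStepT, ← pv_norm_eq p.1 d]
            rw [if_pos (show (2 ≤ PySem.Str.len p.1 ∧ PySem.Str.isIn p.1 text = true) from ⟨h2, hin⟩)]
            by_cases hb : PySem.Set.contains allow (pvNormalizeToken p.1 d) = true ∧
                ¬ List.contains (PySem.Set.inter cands allow) (pvNormalizeToken p.1 d) = true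
            · rw [if_pos hb, if_pos ⟨hn, hb.1, hb.2⟩]
            · rw [if_neg hb, if_neg (fun hcon => hb ⟨hcon.2.1, hcon.2.2⟩)]
          rw [hA, hB, ih (PySem.Set.add cands (pvNormalizeToken p.1 d)), pv_inter_add]
      · have hA : pvStepA text d cands p.1 = cands := by
          simp only [pvStepA]
          rw [if_neg hne, if_neg hin]
        have hB : pvStepT text d allow (PySem.Set.inter cands allow) p = PySem.Set.inter cands allow := by
          simp only [pvStepT]
          rw [if_neg (fun hcon => hin hcon.2)]
        rw [hA, hB]
        exact ih cands
    · have hA : pvStepA text d cands p.1 = cands := by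
        simp only [pvStepA]
        rw [if_pos (Or.inr (show PySem.Str.len p.1 < 2 by omega))]
      have hB : pvStepT text d allow (PySem.Set.inter cands allow) p = PySem.Set.inter cands allow := by
        simp only [pvStepT]
        rw [if_neg (fun hcon => h2 hcon.1)]
      rw [hA, hB]
      exact ih cands

-- A's filtered evidence set equals the fold of the reference step
theorem pv_evset_eq (ev : String) (a2s : List (String × String)) (allow : List String) :
    PySem.Set.inter (pvEvidenceTokens [ev] ⟨a2s⟩) allow
      = a2s.foldl (pvStepT (PySem.Str.slice ev none (some 8000)) ⟨a2s⟩ allow) [] := by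
  have hj : PySem.Str.join "\n" [ev] = ev := by simp [PySem.Str.join]
  have hk : PySem.Dict.keys (⟨a2s⟩ : PySem.Dict String String) = a2s.map (fun p => p.1) := rfl
  simp only [pvEvidenceTokens, hj, hk, List.foldl_map]
  exact pv_fuse (PySem.Str.slice ev none (some 8000)) ⟨a2s⟩ allow a2s []

-- membership in B's substring index, one length at a time
theorem pv_mem_slices (text a : String) (L : Int) (hL : 0 ≤ L) :
    a ∈ pvSlices text L ↔ (a.toList.length : Int) = L ∧ a.toList <:+: text.toList := by
  simp only [pvSlices, List.mem_map]
  constructor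
  · rintro ⟨i, hi, hs⟩
    obtain ⟨hi0, hib⟩ := PySem.List.mem_pyRange_one.mp hi
    rw [PySem.Str.len_eq] at hib
    have hcut : (i + L).toNat - i.toNat = L.toNat := by omega
    have htl : a.toList = (text.toList.drop i.toNat).take L.toNat := by
      rw [← hs, PySem.Str.toList_slice, PySem.Chars.slice_eq_listSlice,
          PySem.List.slice_toNat _ hi0 (by omega), hcut]
    constructor
    · rw [htl]
      simp only [List.length_take, List.length_drop]
      omega
    · rw [htl]
      exact (List.take_prefix _ _).isInfix.trans (List.drop_suffix _ _).isInfix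
  · rintro ⟨hlen, s, t, hst⟩
    have hT := congrArg List.length hst
    simp only [List.length_append] at hT
    refine ⟨(s.length : Int), ?_, ?_⟩
    · rw [PySem.List.mem_pyRange_one, PySem.Str.len_eq]
      omega
    · apply String.toList_inj.mp
      rw [PySem.Str.toList_slice, PySem.Chars.slice_eq_listSlice]
      have h1 : ((s.length : Int) + L) = ((s.length : Nat) : Int) + ((a.toList.length : Nat) : Int) := by
        rw [hlen]
      rw [h1, PySem.List.slice_natCast_add, ← hst, List.append_assoc, List.drop_left,
          List.take_left]

-- membership in the accumulated substring index
theorem pv_mem_subs_fold (text a : String) :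
    ∀ (ls : List Int) (s0 : PySem.Set String),
      a ∈ ls.foldl (fun s L => PySem.Set.update s (pvSlices text L)) s0
        ↔ a ∈ s0 ∨ ∃ L ∈ ls, a ∈ pvSlices text L := by
  intro ls
  induction ls with
  | nil => intro s0; simp
  | cons L ls ih =>
    intro s0
    simp only [List.foldl_cons, ih, PySem.Set.mem_update]
    constructor
    · rintro ((h | h) | h)
      · exact Or.inl h
      · exact Or.inr ⟨L, List.mem_cons_self, h⟩
      · obtain ⟨M, hM, ha⟩ := h
        exact Or.inr ⟨M, List.mem_cons_of_mem _ hM, ha⟩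
    · rintro (h | ⟨M, hM, ha⟩)
      · exact Or.inl (Or.inl h)
      · rcases List.mem_cons.mp hM with h | h
        · exact Or.inl (Or.inr (h ▸ ha))
        · exact Or.inr ⟨M, h, ha⟩

-- for a key whose length is indexed, the substring-index lookup IS Python's `a in text`
theorem pv_contains_subs (text : String) (a2s : List (String × String)) (a : String)
    (ha : PySem.Str.len a ∈ pvLengths a2s) :
    PySem.Set.contains (pvSubs text (pvLengths a2s)) a = PySem.Str.isIn a text := by
  have hall : ∀ M ∈ pvLengths a2s, 0 ≤ M := by
    intro M hM
    obtain ⟨p, _, rfl⟩ :=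
      List.mem_map.mp ((PySem.Set.mem_ofList _ _).mp hM)
    rw [PySem.Str.len_eq]
    positivity
  by_cases hin : PySem.Str.isIn a text = true
  · rw [hin, PySem.Set.contains_iff]
    unfold pvSubs
    rw [pv_mem_subs_fold]
    refine Or.inr ⟨PySem.Str.len a, ha, ?_⟩
    rw [pv_mem_slices text a _ (hall _ ha)]
    exact ⟨(PySem.Str.len_eq a).symm, (PySem.Str.isIn_iff_infix a text).mp hin⟩
  · have hin' : PySem.Str.isIn a text = false := by simpa using hin
    rw [hin', Bool.eq_false_iff]
    intro hc
    have hmem := (PySem.Set.contains_iff _ _).mp hc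
    unfold pvSubs at hmem
    rw [pv_mem_subs_fold] at hmem
    rcases hmem with h | ⟨M, hM, hsl⟩
    · exact absurd h (by simp [PySem.Set.empty])
    · have hinf := ((pv_mem_slices text a M (hall M hM)).mp hsl).2
      exact hin ((PySem.Str.isIn_iff_infix a text).mpr hinf)

-- each step of B's collection loop keeps seen = evf, so the pair fold projects to a list fold
theorem pv_pair_fold (subs : PySem.Set String) (d : PySem.Dict String String) (allow : List String) :
    ∀ (l : List (String × String)) (evf : List String),
      l.foldl (pvStepB subs d allow) (evf, evf)
        = (l.foldl (pvStepS subs d allow) evf, l.foldl (pvStepS subs d allow) evf) := by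
  intro l
  induction l with
  | nil => intro evf; rfl
  | cons p l ih =>
    intro evf
    simp only [List.foldl_cons]
    have hstep : pvStepB subs d allow (evf, evf) p
        = (pvStepS subs d allow evf p, pvStepS subs d allow evf p) := by
      simp only [pvStepB, pvStepS]
      by_cases h1 : 2 ≤ PySem.Str.len p.1 ∧ PySem.Set.contains subs p.1
      · rw [if_pos h1, if_pos h1]
        generalize (if PySem.Str.strip p.1 = "" then ""
            else PySem.Dict.getD d (PySem.Str.strip p.1) (PySem.Str.strip p.1)) = norm
        split_ifs with h2
        · have hadd : PySem.Set.add evf norm = evf ++ [norm] := by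
            simp only [PySem.Set.add]
            rw [if_neg (by simpa using h2.2.2)]
          rw [hadd]
        · rfl
      · rw [if_neg h1, if_neg h1]
    rw [hstep, ih]

-- on the keys of a2s, the subs test agrees with the substring test
theorem pv_stepS_eq_stepT (ev : String) (a2s : List (String × String)) (allow : List String) :
    ∀ (evf : List String) (p : String × String), p ∈ a2s →
      pvStepS (pvSubs (PySem.Str.slice ev none (some 8000)) (pvLengths a2s)) ⟨a2s⟩ allow evf p
        = pvStepT (PySem.Str.slice ev none (some 8000)) ⟨a2s⟩ allow evf p := by
  intro evf p hp
  by_cases h2 : 2 ≤ PySem.Str.len p.1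
  · have ha : PySem.Str.len p.1 ∈ pvLengths a2s := by
      unfold pvLengths
      rw [PySem.Set.mem_ofList]
      exact List.mem_map.mpr ⟨p, List.mem_filter.mpr ⟨hp, by simpa using h2⟩, rfl⟩
    have hc := pv_contains_subs (PySem.Str.slice ev none (some 8000)) a2s p.1 ha
    simp only [pvStepS, pvStepT, hc, PySem.Set.contains_eq_listContains]
    split_ifs <;> rfl
  · simp only [pvStepS, pvStepT]
    rw [if_neg (fun hcon => h2 hcon.1), if_neg (fun hcon => h2 hcon.1)]

-- inner loop of the inverted-index build
theorem pv_idx_inner (i : Nat) :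
    ∀ (opt : List String) (d : PySem.Dict String (PySem.Set Nat)) (e : String) (j : Nat),
      (j ∈ (opt.foldl (pvAddIdx i) d).getD e []) ↔ j ∈ d.getD e [] ∨ (j = i ∧ e ∈ opt) := by
  intro opt
  induction opt with
  | nil => intro d e j; simp
  | cons x opt ih =>
    intro d e j
    simp only [List.foldl_cons, ih]
    have hd : (pvAddIdx i d x).getD e []
        = if e = x then PySem.Set.add (d.getD x []) i else d.getD e [] := by
      simp [pvAddIdx, PySem.Dict.getD_insert]
    by_cases hex : e = x
    · subst hex
      simp [hd, PySem.Set.mem_add]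
      tauto
    · simp only [hd, if_neg hex, List.mem_cons]
      have : ¬ e = x := hex
      tauto

-- the inverted index maps e to exactly the indices of the option sets containing e
theorem pv_idx_mem_aux (e : String) (j : Nat) :
    ∀ (l : List (List String)) (k : Nat) (d : PySem.Dict String (PySem.Set Nat)),
      (j ∈ ((l.zipIdx k).foldl (fun d q => q.1.foldl (pvAddIdx q.2) d) d).getD e [])
        ↔ j ∈ d.getD e [] ∨ (k ≤ j ∧ j < k + l.length ∧ e ∈ l.getD (j - k) []) := by
  intro l
  induction l with
  | nil =>
    intro k d
    simp only [List.zipIdx_nil, List.foldl_nil, List.length_nil]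
    constructor
    · exact Or.inl
    · rintro (h | h)
      · exact h
      · omega
  | cons x l ih =>
    intro k d
    rw [List.zipIdx_cons, List.foldl_cons, ih (k + 1), pv_idx_inner]
    constructor
    · rintro ((h | ⟨rfl, hx⟩) | ⟨h1, h2, h3⟩)
      · exact Or.inl h
      · refine Or.inr ⟨le_refl _, by simp, ?_⟩
        simpa using hx
      · refine Or.inr ⟨by omega, by simp; omega, ?_⟩
        have hjk : j - k = (j - (k + 1)) + 1 := by omega
        rw [hjk, List.getD_cons_succ]
        exact h3
    · rintro (h | ⟨h1, h2, h3⟩)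
      · exact Or.inl (Or.inl h)
      · by_cases hjk : j = k
        · subst hjk
          refine Or.inl (Or.inr ⟨rfl, ?_⟩)
          simpa using h3
        · refine Or.inr ⟨by omega, by simp at h2 ⊢; omega, ?_⟩
          have hjk' : j - k = (j - (k + 1)) + 1 := by omega
          rw [hjk', List.getD_cons_succ] at h3
          exact h3

theorem pv_idx_mem (opt_sets : List (List String)) (e : String) (j : Nat) :
    j ∈ (pvBuildIdx opt_sets).getD e [] ↔ j < opt_sets.length ∧ e ∈ opt_sets.getD j [] := by
  unfold pvBuildIdx
  rw [pv_idx_mem_aux e j opt_sets 0 PySem.Dict.empty]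
  simp [PySem.Dict.getD_empty]

-- the stored index sets have no duplicates
theorem pv_idx_inner_nodup (i : Nat) :
    ∀ (opt : List String) (d : PySem.Dict String (PySem.Set Nat)),
      (∀ e, (d.getD e []).Nodup) → ∀ e, ((opt.foldl (pvAddIdx i) d).getD e []).Nodup := by
  intro opt
  induction opt with
  | nil => intro d h e; exact h e
  | cons x opt ih =>
    intro d h e
    refine ih (pvAddIdx i d x) ?_ e
    intro e'
    simp only [pvAddIdx, PySem.Dict.getD_insert]
    split
    · exact PySem.Set.nodup_add _ _ (h x)
    · exact h e'

theorem pv_idx_outer_nodup :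
    ∀ (l : List (List String × Nat)) (d : PySem.Dict String (PySem.Set Nat)),
      (∀ e, (d.getD e []).Nodup) →
        ∀ e, ((l.foldl (fun d q => q.1.foldl (pvAddIdx q.2) d) d).getD e []).Nodup := by
  intro l
  induction l with
  | nil => intro d h e; exact h e
  | cons q l ih =>
    intro d h e
    exact ih (q.1.foldl (pvAddIdx q.2) d) (pv_idx_inner_nodup q.2 q.1 d h) e

theorem pv_idx_nodup (opt_sets : List (List String)) (e : String) :
    ((pvBuildIdx opt_sets).getD e []).Nodup := by
  unfold pvBuildIdx
  exact pv_idx_outer_nodup opt_sets.zipIdx PySem.Dict.empty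
    (fun e' => by simp [PySem.Dict.getD_empty]) e

-- one bump pass adds the multiplicity of each index
theorem pv_bump_getD (l : List Nat) :
    ∀ (cs : List Int),
      (l.foldl (fun cs i => cs.modify i (· + 1)) cs).length = cs.length ∧
        ∀ j, j < cs.length →
          (l.foldl (fun cs i => cs.modify i (· + 1)) cs).getD j 0
            = cs.getD j 0 + (l.count j : Int) := by
  induction l with
  | nil => intro cs; exact ⟨rfl, fun j _ => by simp⟩
  | cons i l ih =>
    intro cs
    obtain ⟨hL, hV⟩ := ih (cs.modify i (· + 1))
    refine ⟨by rw [List.foldl_cons, hL, List.length_modify], ?_⟩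
    intro j hj
    rw [List.foldl_cons, hV j (by rw [List.length_modify]; exact hj)]
    have hm : (cs.modify i (· + 1)).getD j 0
        = if i = j then cs.getD j 0 + 1 else cs.getD j 0 := by
      rw [List.getD_eq_getElem _ _ (show j < (cs.modify i (· + 1)).length by
            rw [List.length_modify]; exact hj),
          List.getElem_modify, List.getD_eq_getElem _ _ hj]
    rw [hm, List.count_cons]
    by_cases hij : i = j
    · subst hij
      simp only [BEq.rfl, if_true]
      push_cast
      ring
    · simp only [if_neg hij, beq_eq_false_iff_ne.mpr hij, if_false,
        Bool.false_eq_true, Nat.add_zero]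

-- pointwise value of B's counting loop
theorem pv_counts_get (opt_sets : List (List String)) :
    ∀ (evf : List String) (cnts : List Int), cnts.length = opt_sets.length →
      (evf.foldl (pvBump (pvBuildIdx opt_sets)) cnts).length = opt_sets.length ∧
        ∀ i, i < opt_sets.length →
          (evf.foldl (pvBump (pvBuildIdx opt_sets)) cnts).getD i 0
            = cnts.getD i 0
              + ((evf.filter (fun e => PySem.Set.contains (opt_sets.getD i []) e)).length : Int) := by
  intro evf
  induction evf with
  | nil => intro cnts h; exact ⟨h, fun i _ => by simp⟩
  | cons e evf ih =>
    intro cnts h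
    obtain ⟨hbl, hbv⟩ := pv_bump_getD ((pvBuildIdx opt_sets).getD e []) cnts
    have hb : (pvBump (pvBuildIdx opt_sets) cnts e).length = opt_sets.length := by
      simp only [pvBump]
      rw [hbl, h]
    obtain ⟨hl, hv⟩ := ih (pvBump (pvBuildIdx opt_sets) cnts e) hb
    refine ⟨by simpa using hl, ?_⟩
    intro i hi
    rw [List.foldl_cons, hv i hi]
    have hstep : (pvBump (pvBuildIdx opt_sets) cnts e).getD i 0
        = cnts.getD i 0 + (if PySem.Set.contains (opt_sets.getD i []) e then (1 : Int) else 0) := by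
      simp only [pvBump]
      rw [hbv i (by omega)]
      congr 1
      by_cases hc : e ∈ opt_sets.getD i []
      · rw [List.count_eq_one_of_mem (pv_idx_nodup opt_sets e)
            ((pv_idx_mem opt_sets e i).mpr ⟨hi, hc⟩)]
        rw [if_pos ((PySem.Set.contains_iff _ _).mpr hc)]
        rfl
      · rw [List.count_eq_zero.mpr (fun hmem => hc ((pv_idx_mem opt_sets e i).mp hmem).2)]
        rw [if_neg (fun hcon => hc ((PySem.Set.contains_iff _ _).mp hcon))]
        rfl
    rw [hstep, List.filter_cons]
    by_cases hc2 : PySem.Set.contains (opt_sets.getD i []) e = true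
    · rw [if_pos hc2, if_pos hc2, List.length_cons]
      push_cast
      ring
    · rw [if_neg hc2, if_neg hc2]
      ring

theorem pv_enumerate_getElem (l : List Int) :
    ∀ (s : Int) (i : Nat) (h : i < l.length),
      (PySem.List.enumerate l s)[i]'(by rw [PySem.List.length_enumerate]; exact h)
        = (s + i, l.getD i 0) := by
  induction l with
  | nil => intro s i h; exact absurd h (by simp)
  | cons x l ih =>
    intro s i h
    cases i with
    | zero => simp [PySem.List.enumerate_cons]
    | succ i =>
      simp only [PySem.List.enumerate_cons, List.getElem_cons_succ, List.getD_cons_succ]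
      rw [ih (s + 1) i (by simpa using h)]
      congr 1
      push_cast
      ring

-- B's enumerated counts equal A's scores list
theorem pv_pairs_eq (opt_sets : List (List String)) (evf : List String) :
    PySem.List.enumerate (evf.foldl (pvBump (pvBuildIdx opt_sets)) (List.replicate opt_sets.length (0 : Int)))
      = (PySem.List.pyRange 0 opt_sets.length 1).map (fun i =>
          (i, PySem.Set.len (PySem.Set.inter evf (PySem.List.pyGetD opt_sets i [])))) := by
  obtain ⟨hl, hv⟩ := pv_counts_get opt_sets evf (List.replicate opt_sets.length (0 : Int)) (by simp)
  apply List.ext_getElem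
  · simp [PySem.List.length_enumerate, hl, PySem.List.length_pyRange_one]
  · intro i h1 h2
    have hi : i < opt_sets.length := by
      simpa [PySem.List.length_enumerate, hl] using h1
    rw [pv_enumerate_getElem _ 0 i (by omega), hv i hi, List.getElem_map,
        PySem.List.getElem_pyRange_one]
    have hr : (0 : Int) + (i : Int) = ((i : Nat) : Int) := by ring
    rw [hr, PySem.List.pyGetD_natCast]
    simp [PySem.Set.len, PySem.Set.inter, PySem.Set.contains]

-- the short-circuit branch's scores are already sorted by index
theorem pv_sorted_range (n : Nat) :
    PySem.List.sorted ((PySem.List.pyRange 0 n 1).map (fun i => (i, (0 : Int)))) (fun x => x.1) false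
      = (PySem.List.pyRange 0 n 1).map (fun i => (i, (0 : Int))) := by
  apply PySem.List.sorted_eq_self_of_pairwise
  exact List.Pairwise.map _ (fun a b hab => le_of_lt hab)
    (PySem.List.pairwise_lt_pyRange_one 0 (n : Int))

-- ===== VERDICT (by name: the statement is the Claim_ definition above) =====
theorem score_options_spec : Claim_equal_score_options := by
  intro ev opt_sets a2s allow rk w _
  unfold Spec_score_options score_options score_options_alt
  by_cases h : (PySem.Str.isIn "Vector Disabled" ev || PySem.Str.isIn "Graph Disabled" ev) ∧ PySem.Str.len ev < 100
  · rw [if_pos h, if_pos h]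
    dsimp only
    rw [pv_sorted_range]
    rfl
  · rw [if_neg h, if_neg h]
    dsimp only
    have hevf : (a2s.foldl (pvStepB (pvSubs (PySem.Str.slice ev none (some 8000)) (pvLengths a2s)) ⟨a2s⟩ allow) ([], PySem.Set.empty)).1
        = PySem.Set.inter (pvEvidenceTokens [ev] ⟨a2s⟩) allow := by
      have h0 : (([], PySem.Set.empty) : List String × PySem.Set String) = (([] : List String), ([] : List String)) := rfl
      rw [h0, pv_pair_fold,
          PySem.List.foldl_congr_mem a2s _ _ _ (fun acc x hx => pv_stepS_eq_stepT ev a2s allow acc x hx),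
          pv_evset_eq]
    rw [hevf, pv_pairs_eq]
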